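-- pv_equiv track=rewrite | github.com/nuffertaylor/leetcode | grandpascheckerboard.py | verifyRow
-- ===== SOURCE A (Python) =====
-- def verifyRow(r):
--   numW, numB, consec = 0,0,0
--   color = True
--   for c in r:
--     if(c == 'W'):
--       numW+=1
--       if color == False:
--         color = True
--         consec = 0
--       consec += 1
--     else:
--       numB+=1
--       if color == True:
--         color = False
--         consec = 0
--       consec += 1
--     if consec == 3: return False
--   if numW != numB: return False
--   return True
-- ===== SOURCE B (Python) =====
-- def verifyRow(r):
--   colors = [c == 'W' for c in r]
--   if any(a == b == c for a, b, c in zip(colors, colors[1:], colors[2:])):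
--     return False
--   return 2 * sum(colors) == len(r)
-- ===== Notes on version B (the rewrite author's own statement) =====
-- stated objective: idiomatic
-- what changed: Replaces A's incremental color-flag/run-counter state machine with a staged, stateless formulation: map chars to booleans, reject if any sliding window of three consecutive booleans is constant (zip of three shifted lists), then compare 2*sum(colors) with len(r).
import Mathlib
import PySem

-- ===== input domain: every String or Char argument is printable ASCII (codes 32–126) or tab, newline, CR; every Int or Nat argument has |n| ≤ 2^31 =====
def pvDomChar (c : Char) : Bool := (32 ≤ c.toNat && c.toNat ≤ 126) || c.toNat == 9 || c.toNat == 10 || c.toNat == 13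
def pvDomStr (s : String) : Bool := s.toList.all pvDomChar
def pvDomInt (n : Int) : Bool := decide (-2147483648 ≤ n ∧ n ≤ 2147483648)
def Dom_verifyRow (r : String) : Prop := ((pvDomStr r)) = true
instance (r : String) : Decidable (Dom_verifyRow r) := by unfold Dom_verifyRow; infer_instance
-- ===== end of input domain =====

-- B replaces A's incremental color-flag/run-counter state machine by a stateless staged
-- formulation: a sliding-window check (no three consecutive equal colors, via a zip of three
-- shifted lists) followed by a count comparison; objective: idiomatic, same cost.

-- ===== PORT A =====
-- literal port of A's loop: state (numW, numB, consec, color)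
def loopA : List Char → Int → Int → Int → Bool → Bool
  | [], numW, numB, _, _ => numW == numB
  | c :: cs, numW, numB, consec, color =>
    if c == 'W' then
      let numW := numW + 1
      let p := if color == false then (true, (0 : Int)) else (color, consec)
      let consec := p.2 + 1
      if consec == 3 then false else loopA cs numW numB consec p.1
    else
      let numB := numB + 1
      let p := if color == true then (false, (0 : Int)) else (color, consec)
      let consec := p.2 + 1
      if consec == 3 then false else loopA cs numW numB consec p.1

def verifyRow (r : String) : Bool := loopA r.toList 0 0 0 true

-- ===== PORT B =====
-- colors = [c == 'W' for c in r]; zip(colors, colors[1:], colors[2:]) — the slices colors[1:],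
-- colors[2:] are ported as List.drop 1 / List.drop 2 (exact for these nonnegative indices);
-- sum(colors) sums booleans, i.e. counts True.
def verifyRow_alt (r : String) : Bool :=
  let colors := r.toList.map (fun c => c == 'W')
  if (List.zip colors (List.zip (colors.drop 1) (colors.drop 2))).any
      (fun t => t.1 == t.2.1 && t.2.1 == t.2.2) then false
  else (2 * (colors.count true : Int)) == (colors.length : Int)

-- ===== PRECONDITION & SPEC =====
def Spec_verifyRow (r : String) (out : Bool) : Prop := out = verifyRow_alt r
instance (r : String) (out : Bool) : Decidable (Spec_verifyRow r out) := by unfold Spec_verifyRow; infer_instance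

-- ===== CLAIM (what is proved, stated in full; the proofs are below) =====
def Claim_equal_verifyRow : Prop := ∀ (r : String), Dom_verifyRow r → Spec_verifyRow r (verifyRow r)

-- ===== LEMMAS AND PROOFS =====
-- sliding-window "has three consecutive equal booleans" as B computes it
def W3 (ks : List Bool) : Bool :=
  (List.zip ks (List.zip (ks.drop 1) (ks.drop 2))).any
    (fun t => t.1 == t.2.1 && t.2.1 == t.2.2)

-- A's triple detector, abstracted out of its loop: k = current run's color, n = its length
def T : Bool → Int → List Char → Bool
  | _, _, [] => false
  | k, n, c :: cs =>
    if (c == 'W') == k then (if n + 1 == 3 then true else T k (n + 1) cs)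
    else T (c == 'W') 1 cs

def countW : List Char → Int
  | [] => 0
  | c :: cs => (if c == 'W' then 1 else 0) + countW cs

def countB : List Char → Int
  | [] => 0
  | c :: cs => (if c == 'W' then 0 else 1) + countB cs

lemma int_beq (a b : Int) : (a == b) = decide (a = b) := by
  by_cases h : a = b <;> simp [h]

lemma W3_cons3 (x y z : Bool) (rest : List Bool) :
    W3 (x :: y :: z :: rest) = ((x == y && y == z) || W3 (y :: z :: rest)) := by
  simp [W3]

lemma W3_cons_ne (x y : Bool) (l : List Bool) (h : (x == y) = false) :
    W3 (x :: y :: l) = W3 (y :: l) := by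
  cases l with
  | nil => simp [W3]
  | cons z zs => rw [W3_cons3, h]; simp

lemma len_eq_counts (cs : List Char) : (cs.length : Int) = countW cs + countB cs := by
  induction cs with
  | nil => simp [countW, countB]
  | cons c cs ih => simp [countW, countB]; split_ifs <;> omega

lemma count_eq_countW (cs : List Char) :
    ((cs.map (fun c => c == 'W')).count true : Int) = countW cs := by
  induction cs with
  | nil => simp [countW]
  | cons c cs ih =>
    simp only [List.map_cons, List.count_cons, countW]
    by_cases h : (c == 'W') = true <;> simp [h, ih] <;> omega

-- T against the sliding window, with the current run re-materialised in front
lemma T_W3 (cs : List Char) : ∀ k : Bool,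
    (T k 1 cs = W3 (k :: cs.map (fun c => c == 'W'))) ∧
    (T k 2 cs = W3 (k :: k :: cs.map (fun c => c == 'W'))) := by
  induction cs with
  | nil =>
    intro k
    constructor <;> simp [T, W3]
  | cons c cs ih =>
    intro k
    have ihb := ih (c == 'W')
    have ihk := ih k
    by_cases h : (c == 'W') = k
    · subst h
      constructor
      · rw [show T (c == 'W') 1 (c :: cs) = T (c == 'W') 2 cs from by
            simp [T, show ((1:Int) + 1 == 3) = false from rfl],
          List.map_cons]
        exact ihb.2
      · rw [show T (c == 'W') 2 (c :: cs) = true from by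
            simp [T, show ((2:Int) + 1 == 3) = true from rfl],
          List.map_cons, W3_cons3]
        simp
    · have hk : ((c == 'W') == k) = false := by simp [h]
      have hkb : (k == (c == 'W')) = false := by
        cases k <;> cases hcw : (c == 'W') <;> simp_all
      constructor
      · simp only [T, hk, Bool.false_eq_true, if_false, List.map_cons]
        rw [ihb.1, W3_cons_ne _ _ _ hkb]
      · simp only [T, hk, Bool.false_eq_true, if_false, List.map_cons]
        rw [ihb.1, W3_cons3, W3_cons_ne _ _ _ hkb]
        simp [hkb]

-- A's loop, characterised by the triple detector plus the running counts
lemma loopA_char (cs : List Char) : ∀ (k : Bool) (n numW numB : Int), 1 ≤ n → n ≤ 2 →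
    loopA cs numW numB n k =
      if T k n cs then false else (numW + countW cs == numB + countB cs) := by
  induction cs with
  | nil =>
    intro k n numW numB h1 h2
    simp [loopA, T, countW, countB]
  | cons c cs ih =>
    intro k n numW numB h1 h2
    by_cases hc : (c == 'W') = true
    · cases k with
      | true =>
        simp only [loopA, hc, if_pos, T, beq_self_eq_true,
          show ((true == false) = true) = False by simp, if_false]
        by_cases h3 : n + 1 = 3
        · simp [h3]
        · have h3' : (n + 1 == 3) = false := by simp [h3]
          simp only [h3', Bool.false_eq_true, if_false]
          rw [ih true (n + 1) (numW + 1) numB (by omega) (by omega)]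
          simp only [countW, countB, hc, if_pos]
          congr 1
          rw [int_beq, int_beq, decide_eq_decide]
          omega
      | false =>
        simp only [loopA, hc, if_pos, T,
          show ((false == false) = true) = True by simp, if_true,
          show ((c == 'W') == false) = false by simp [hc], Bool.false_eq_true, if_false,
          show (((0:Int) + 1) == 3) = false from rfl]
        rw [show ((0:Int) + 1) = 1 from by norm_num,
          ih true 1 (numW + 1) numB (by omega) (by omega)]
        simp only [countW, countB, hc, if_pos]
        congr 1
        rw [int_beq, int_beq, decide_eq_decide]
        omega
    · have hc' : (c == 'W') = false := by simp_all
      cases k with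
      | false =>
        simp only [loopA, hc', Bool.false_eq_true, if_false, T, beq_self_eq_true,
          show ((false == true) = true) = False by simp, if_pos]
        by_cases h3 : n + 1 = 3
        · simp [h3]
        · have h3' : (n + 1 == 3) = false := by simp [h3]
          simp only [h3', Bool.false_eq_true, if_false]
          rw [ih false (n + 1) numW (numB + 1) (by omega) (by omega)]
          simp only [countW, countB, hc', Bool.false_eq_true, if_false]
          congr 1
          rw [int_beq, int_beq, decide_eq_decide]
          omega
      | true =>
        simp only [loopA, hc', Bool.false_eq_true, if_false, T,
          show ((true == true) = true) = True by simp, if_true,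
          show ((c == 'W') == true) = false by simp [hc'], Bool.false_eq_true,
          show (((0:Int) + 1) == 3) = false from rfl]
        rw [show ((0:Int) + 1) = 1 from by norm_num,
          ih false 1 numW (numB + 1) (by omega) (by omega)]
        simp only [countW, countB, hc', Bool.false_eq_true, if_false]
        congr 1
        rw [int_beq, int_beq, decide_eq_decide]
        omega

lemma main_eq (cs : List Char) : loopA cs 0 0 0 true =
    (if W3 (cs.map (fun c => c == 'W')) then false
     else ((2 * (((cs.map (fun c => c == 'W')).count true : Int)) ==
       ((cs.map (fun c => c == 'W')).length : Int))) : Bool) := by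
  cases cs with
  | nil => simp [loopA, W3]
  | cons c cs =>
    have hfirst : loopA (c :: cs) 0 0 0 true =
        loopA cs (if c == 'W' then 1 else 0) (if c == 'W' then 0 else 1) 1 (c == 'W') := by
      by_cases h : (c == 'W') = true
      · simp [loopA, h]
      · have h' : (c == 'W') = false := by simp_all
        simp [loopA, h']
    rw [hfirst, loopA_char cs (c == 'W') 1 _ _ (by omega) (by omega)]
    have hT : T (c == 'W') 1 cs = W3 ((c :: cs).map (fun c => c == 'W')) := by
      rw [(T_W3 cs (c == 'W')).1]; rfl
    rw [hT]
    cases hW : W3 ((c :: cs).map (fun c => c == 'W')) with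
    | true => simp
    | false =>
      simp only [Bool.false_eq_true, if_false]
      rw [count_eq_countW, List.length_map]
      have hlen := len_eq_counts (c :: cs)
      simp only [countW, countB] at hlen ⊢
      rw [int_beq, int_beq, decide_eq_decide]
      by_cases h : (c == 'W') = true <;> simp [h] at hlen ⊢ <;> omega

-- ===== VERDICT (by name: the statement is the Claim_ definition above) =====
theorem verifyRow_spec : Claim_equal_verifyRow := by
  intro r _
  unfold Spec_verifyRow verifyRow verifyRow_alt
  exact main_eq r.toList
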